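-- pv_equiv track=rewrite | github.com/Phillip383/boot.dev-static-site-generator | src/splitblocks.py | __check_ordered_list
-- ===== SOURCE A (Python) =====
-- def __check_ordered_list(lines) -> bool:
--     previous_num = None
--     for i in range(len(lines)):
--         try:
--             current_num = int(lines[i][0])
--         except:
--             return False
--         else:
--             if previous_num != None:
--                 if current_num != previous_num + 1:
--                     return False
--             previous_num = current_num
--     return True
-- ===== SOURCE B (Python) =====
-- def __check_ordered_list(lines) -> bool:
--     # Pass 1: extract the leading digit of every line; fail fast if a line
--     # is empty or does not start with a decimal digit.
--     nums = []
--     for line in lines: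
--         if not line or line[0] not in "0123456789":
--             return False
--         nums.append(ord(line[0]) - 48)
--     # Pass 2: the numbers are consecutive iff they equal one run of range().
--     return nums == list(range(nums[0], nums[0] + len(nums))) if nums else True
-- ===== Notes on version B (the rewrite author's own statement) =====
-- stated objective: alternative
-- what changed: A interleaves parsing and the consecutiveness test in one try/except loop carrying previous_num; B separates the two passes: it first extracts every leading digit (failing fast via explicit emptiness/digit tests instead of exceptions), then checks consecutiveness by comparing the whole list against one range().
import Mathlib
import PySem

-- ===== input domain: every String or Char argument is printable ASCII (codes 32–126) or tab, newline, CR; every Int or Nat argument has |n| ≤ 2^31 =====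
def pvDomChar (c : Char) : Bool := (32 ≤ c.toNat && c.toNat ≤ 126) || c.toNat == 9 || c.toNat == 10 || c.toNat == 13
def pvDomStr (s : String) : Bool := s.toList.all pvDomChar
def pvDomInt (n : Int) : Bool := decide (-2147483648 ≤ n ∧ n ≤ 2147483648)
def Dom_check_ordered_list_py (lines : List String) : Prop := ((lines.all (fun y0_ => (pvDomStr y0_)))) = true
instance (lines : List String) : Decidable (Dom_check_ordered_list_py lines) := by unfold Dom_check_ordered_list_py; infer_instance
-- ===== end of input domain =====

-- B splits A's single try/except loop into two passes: extract each line's leading digit, then compare the list against one integer range.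


-- ===== PORT A =====
-- try: current_num = int(lines[i][0]) — lines[i][0] may raise IndexError, int(...) ValueError; the bare
-- except catches both, modelled as Option: PySem.Str.pyGet? for the indexing, PySem.Int.ofChars? for int().
def pvALoop (lines : List String) (prev : Option Int) : Bool :=
  match lines with
  | [] => true
  | l :: rest =>
    match (PySem.Str.pyGet? l 0).bind (fun ch => PySem.Int.ofChars? [ch]) with
    | none => false
    | some cur =>
      match prev with
      | none => pvALoop rest (some cur)
      | some p => if cur ≠ p + 1 then false else pvALoop rest (some cur)

def check_ordered_list_py (lines : List String) : Bool :=
  pvALoop lines none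

-- ===== PORT B =====
-- Pass 1 of Source B: the list `nums` of leading digits, `none` when some line makes B return False early.
def pvBNums (lines : List String) : Option (List Int) :=
  match lines with
  | [] => some []
  | l :: rest =>
    match l.toList with
    | [] => none
    | c :: _ =>
      if c ∈ "0123456789".toList then
        (pvBNums rest).map (fun ns => ((c.toNat : Int) - 48) :: ns)
      else none

def check_ordered_list_py_alt (lines : List String) : Bool :=
  match pvBNums lines with
  | none => false
  | some [] => true
  | some (n :: rest) =>
      decide ((n :: rest) = PySem.List.pyRange n (n + (n :: rest).length) 1)

-- ===== PRECONDITION & SPEC =====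
def Spec_check_ordered_list_py (lines : List String) (out : Bool) : Prop := out = check_ordered_list_py_alt lines
instance (lines : List String) (out : Bool) : Decidable (Spec_check_ordered_list_py lines out) := by unfold Spec_check_ordered_list_py; infer_instance

-- ===== CLAIM (what is proved, stated in full; the proofs are below) =====
def Claim_equal_check_ordered_list_py : Prop := ∀ (lines : List String), Dom_check_ordered_list_py lines → Spec_check_ordered_list_py lines (check_ordered_list_py lines)

-- ===== LEMMAS AND PROOFS =====

-- the value both ports extract from one line: its first character parsed as a digit
def pvLineVal (l : String) : Option Int :=
  match l.toList with
  | [] => none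
  | c :: _ => if c ∈ "0123456789".toList then some ((c.toNat : Int) - 48) else none

-- A's consecutiveness state machine over the already-parsed digits
def pvConsec (prev : Option Int) (ns : List Int) : Bool :=
  match ns with
  | [] => true
  | n :: rest =>
    match prev with
    | none => pvConsec (some n) rest
    | some p => if n ≠ p + 1 then false else pvConsec (some n) rest

-- int() applied to a single ASCII character succeeds exactly on the decimal digits
set_option maxRecDepth 10000 in
lemma pvOfChars_single_range : ∀ n ∈ List.range 127,
    PySem.Int.ofChars? [Char.ofNat n]
      = (if Char.ofNat n ∈ "0123456789".toList then some ((n : Int) - 48) else none) := by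
  decide

lemma pvOfChars_single (c : Char) (h : c.toNat < 127) :
    PySem.Int.ofChars? [c]
      = (if c ∈ "0123456789".toList then some ((c.toNat : Int) - 48) else none) := by
  have := pvOfChars_single_range c.toNat (by simpa using h)
  simpa using this

lemma pvLineVal_A (l : String) (h : pvDomStr l = true) :
    (PySem.Str.pyGet? l 0).bind (fun ch => PySem.Int.ofChars? [ch]) = pvLineVal l := by
  rw [show (0 : Int) = ((0 : Nat) : Int) from rfl, PySem.Str.pyGet?_natCast]
  unfold pvLineVal
  cases hl : l.toList with
  | nil => rfl
  | cons c cs =>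
    have hc : pvDomChar c = true := by
      have h' : (c :: cs).all pvDomChar = true := by
        rw [← hl]; simpa [pvDomStr] using h
      exact (List.all_eq_true.mp h') c (by simp)
    have hlt : c.toNat < 127 := by
      simp [pvDomChar] at hc
      omega
    simp [pvOfChars_single c hlt]

lemma pvBNums_cons (l : String) (rest : List String) :
    pvBNums (l :: rest) = (pvLineVal l).bind (fun v => (pvBNums rest).map (fun ns => v :: ns)) := by
  cases hl : l.toList with
  | nil => simp [pvBNums, pvLineVal, hl]
  | cons c cs =>
    simp only [pvBNums, pvLineVal, hl]
    split <;> simp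

lemma pvALoop_eq (lines : List String) (hdom : Dom_check_ordered_list_py lines) :
    ∀ prev, pvALoop lines prev
      = match pvBNums lines with
        | none => false
        | some ns => pvConsec prev ns := by
  induction lines with
  | nil => intro prev; rfl
  | cons l rest ih =>
    intro prev
    have hl : pvDomStr l = true := by
      have := List.all_eq_true.mp hdom l (by simp)
      simpa using this
    have hrest : Dom_check_ordered_list_py rest := by
      unfold Dom_check_ordered_list_py at hdom ⊢
      simp at hdom ⊢
      exact fun x hx => hdom.2 x hx
    rw [show pvALoop (l :: rest) prev
        = (match (PySem.Str.pyGet? l 0).bind (fun ch => PySem.Int.ofChars? [ch]) with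
           | none => false
           | some cur =>
             match prev with
             | none => pvALoop rest (some cur)
             | some p => if cur ≠ p + 1 then false else pvALoop rest (some cur)) from rfl]
    rw [pvLineVal_A l hl, pvBNums_cons]
    cases hv : pvLineVal l with
    | none => rfl
    | some cur =>
      cases hb : pvBNums rest with
      | none =>
        have hfalse : pvALoop rest (some cur) = false := by rw [ih hrest (some cur), hb]
        cases prev with
        | none => simpa using hfalse
        | some p =>
          by_cases hne : cur = p + 1
          · subst hne; simpa using hfalse
          · simp [hne]
      | some ns =>
        cases prev with
        | none => simp [ih hrest (some cur), hb, pvConsec]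
        | some p =>
          by_cases hne : cur = p + 1
          · subst hne; simp [ih hrest (some (p + 1)), hb, pvConsec]
          · simp [hne, pvConsec]

lemma pvConsec_some (ns : List Int) : ∀ p,
    pvConsec (some p) ns = decide (ns = PySem.List.pyRange (p + 1) (p + 1 + ns.length) 1) := by
  induction ns with
  | nil =>
    intro p
    simp [pvConsec, PySem.List.pyRange_one_eq_nil]
  | cons n rest ih =>
    intro p
    have hcons : PySem.List.pyRange (p + 1) (p + 1 + ((n :: rest).length : Int)) 1
        = (p + 1) :: PySem.List.pyRange (p + 1 + 1) (p + 1 + ((n :: rest).length : Int)) 1 :=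
      PySem.List.pyRange_one_cons (by rw [List.length_cons]; push_cast; omega)
    have hbnd : p + 1 + ((n :: rest).length : Int) = (p + 1) + 1 + (rest.length : Int) := by
      rw [List.length_cons]; push_cast; ring
    by_cases hn : n = p + 1
    · subst hn
      rw [show pvConsec (some p) ((p + 1) :: rest) = pvConsec (some (p + 1)) rest by simp [pvConsec]]
      rw [ih (p + 1), hcons, hbnd]
      simp
    · rw [hcons]
      simp [pvConsec, hn]

-- ===== VERDICT (by name: the statement is the Claim_ definition above) =====
theorem check_ordered_list_py_spec : Claim_equal_check_ordered_list_py := by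
  intro lines hdom
  unfold Spec_check_ordered_list_py check_ordered_list_py check_ordered_list_py_alt
  rw [pvALoop_eq lines hdom none]
  cases hb : pvBNums lines with
  | none => rfl
  | some ns =>
    cases ns with
    | nil => rfl
    | cons n rest =>
      show pvConsec (some n) rest
          = decide ((n :: rest) = PySem.List.pyRange n (n + ((n :: rest).length : Int)) 1)
      have hcons : PySem.List.pyRange n (n + ((n :: rest).length : Int)) 1
          = n :: PySem.List.pyRange (n + 1) (n + ((n :: rest).length : Int)) 1 :=
        PySem.List.pyRange_one_cons (by rw [List.length_cons]; push_cast; omega)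
      have hbnd : n + ((n :: rest).length : Int) = n + 1 + (rest.length : Int) := by
        rw [List.length_cons]; push_cast; ring
      rw [pvConsec_some rest n, hcons, hbnd]
      simp
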